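-- pv_equiv track=rewrite | github.com/vivarium-collective/bigraph-loom | bigraph_loom/convert.py | _parse_port_schema
-- ===== SOURCE A (Python) =====
-- from typing import Any, Literal
--
-- def _parse_port_schema(schema: Any) -> dict:
--     """Parse a port schema into a {port_name: type_string} dict.
--
--     Handles:
--     - Dict: ``{"biomass": "mass", "substrates": "map[concentration]"}`` → as-is
--     - String: ``"biomass:mass|substrates:map[concentration]"`` → parsed to dict
--     - Other: returned as empty dict
--     """
--     if isinstance(schema, dict):
--         return schema
--     if isinstance(schema, str) and schema:
--         result: dict[str, str] = {}
--         # Split on | but not inside brackets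
--         depth = 0
--         current = ""
--         for ch in schema:
--             if ch in "([":
--                 depth += 1
--                 current += ch
--             elif ch in ")]":
--                 depth -= 1
--                 current += ch
--             elif ch == "|" and depth == 0:
--                 _parse_port_entry(current.strip(), result)
--                 current = ""
--             else:
--                 current += ch
--         if current.strip():
--             _parse_port_entry(current.strip(), result)
--         return result
--     return {}
--
-- def _parse_port_entry(entry: str, result: dict) -> None:
--     """Parse a single 'name:type' entry into result dict."""
--     # Find the first colon not inside brackets
--     depth = 0
--     for i, ch in enumerate(entry):
--         if ch in "([":
--             depth += 1
--         elif ch in ")]":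
--             depth -= 1
--         elif ch == ":" and depth == 0:
--             name = entry[:i].strip()
--             type_str = entry[i + 1:].strip()
--             if name:
--                 result[name] = type_str
--             return
--     # No colon found — just a name with no type
--     if entry:
--         result[entry] = ""
-- ===== SOURCE B (Python) =====
-- from typing import Any
--
-- def _parse_port_schema(schema: Any) -> dict:
--     """Parse a port schema into a {port_name: type_string} dict.
--
--     Single-pass state machine: instead of building each segment and re-scanning
--     it for its first top-level colon, accumulate name and type directly while
--     tracking bracket depth and whether the entry's colon has been seen.
--     """
--     if isinstance(schema, dict):
--         return schema
--     if isinstance(schema, str) and schema: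
--         result: dict[str, str] = {}
--         depth = 0
--         name_acc = ""
--         type_acc = ""
--         seen_colon = False
--         for ch in schema:
--             if ch == "|" and depth == 0:
--                 name = name_acc.strip()
--                 if name:
--                     result[name] = type_acc.strip()
--                 name_acc = ""
--                 type_acc = ""
--                 seen_colon = False
--                 continue
--             if ch == ":" and depth == 0 and not seen_colon:
--                 seen_colon = True
--                 continue
--             if ch in "([":
--                 depth += 1
--             elif ch in ")]":
--                 depth -= 1
--             if seen_colon:
--                 type_acc += ch
--             else:
--                 name_acc += ch
--         name = name_acc.strip()
--         if name:
--             result[name] = type_acc.strip()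
--         return result
--     return {}
-- ===== Notes on version B (the rewrite author's own statement) =====
-- stated objective: alternative
-- what changed: Replaced A's two-pass design (build each |-segment into a string, then re-scan it with a helper to find its first top-level colon) with a single-pass state machine that accumulates name and type directly, tracking bracket depth and a seen-colon flag, with no helper and no re-scan of any segment.
import Mathlib
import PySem

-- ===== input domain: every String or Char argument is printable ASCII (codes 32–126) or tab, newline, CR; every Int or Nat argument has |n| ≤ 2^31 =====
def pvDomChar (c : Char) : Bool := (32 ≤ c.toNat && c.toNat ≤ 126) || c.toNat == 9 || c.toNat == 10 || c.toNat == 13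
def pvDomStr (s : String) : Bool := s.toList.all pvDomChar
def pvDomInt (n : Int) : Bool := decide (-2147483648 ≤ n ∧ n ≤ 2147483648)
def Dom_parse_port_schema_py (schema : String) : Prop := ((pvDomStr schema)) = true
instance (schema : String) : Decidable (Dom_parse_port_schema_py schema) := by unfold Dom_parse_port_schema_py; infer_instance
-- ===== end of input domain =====

-- B replaces A's two-pass segment parse (build segment string, re-scan it for its first
-- top-level colon) by a single pass accumulating name/type with a seen-colon flag; same cost.
-- Lean signature takes a String, so only A's string branch is reachable (dict branch is moot).

-- ===== PORT A =====
-- _parse_port_entry's 'for i, ch in enumerate(entry)' loop: rem is the unprocessed suffix, i its start index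
def pa_entry_go (entry : List Char) (result : PySem.Dict String String) :
    List Char → Nat → Int → PySem.Dict String String
  | [], _, _ =>
      -- no colon found
      if entry ≠ [] then result.insert (String.mk entry) "" else result
  | c :: rest, i, depth =>
      if c == '(' || c == '[' then pa_entry_go entry result rest (i + 1) (depth + 1)
      else if c == ')' || c == ']' then pa_entry_go entry result rest (i + 1) (depth - 1)
      else if c == ':' && depth == 0 then
        let name := PySem.Chars.strip (entry.take i)
        let type_str := PySem.Chars.strip (entry.drop (i + 1))
        if name ≠ [] then result.insert (String.mk name) (String.mk type_str) else result
      else pa_entry_go entry result rest (i + 1) depth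

def pa_entry (entry : List Char) (result : PySem.Dict String String) : PySem.Dict String String :=
  pa_entry_go entry result entry 0 0

-- the main 'for ch in schema' loop
def pa_go : List Char → Int → List Char → PySem.Dict String String → PySem.Dict String String
  | [], _, current, result =>
      if PySem.Chars.strip current ≠ [] then pa_entry (PySem.Chars.strip current) result
      else result
  | c :: rest, depth, current, result =>
      if c == '(' || c == '[' then pa_go rest (depth + 1) (current ++ [c]) result
      else if c == ')' || c == ']' then pa_go rest (depth - 1) (current ++ [c]) result
      else if c == '|' && depth == 0 then
        pa_go rest depth [] (pa_entry (PySem.Chars.strip current) result)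
      else pa_go rest depth (current ++ [c]) result

def parse_port_schema_py (schema : String) : List (String × String) :=
  if schema.toList ≠ [] then (pa_go schema.toList 0 [] (PySem.Dict.mk [])).items
  else []

-- ===== PORT B =====
def pb_go : List Char → Int → List Char → List Char → Bool → PySem.Dict String String →
    PySem.Dict String String
  | [], _, nameAcc, typeAcc, _, result =>
      let name := PySem.Chars.strip nameAcc
      if name ≠ [] then result.insert (String.mk name) (String.mk (PySem.Chars.strip typeAcc))
      else result
  | c :: rest, depth, nameAcc, typeAcc, seen, result =>
      if c == '|' && depth == 0 then
        let name := PySem.Chars.strip nameAcc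
        pb_go rest depth [] [] false
          (if name ≠ [] then
             result.insert (String.mk name) (String.mk (PySem.Chars.strip typeAcc))
           else result)
      else if c == ':' && depth == 0 && !seen then
        pb_go rest depth nameAcc typeAcc true result
      else
        let depth' := if c == '(' || c == '[' then depth + 1
                      else if c == ')' || c == ']' then depth - 1
                      else depth
        if seen then pb_go rest depth' nameAcc (typeAcc ++ [c]) seen result
        else pb_go rest depth' (nameAcc ++ [c]) typeAcc seen result

def parse_port_schema_py_alt (schema : String) : List (String × String) :=
  if schema.toList ≠ [] then (pb_go schema.toList 0 [] [] false (PySem.Dict.mk [])).items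
  else []

-- ===== PRECONDITION & SPEC =====
def Spec_parse_port_schema_py (schema : String) (out : List (String × String)) : Prop := out = parse_port_schema_py_alt schema
instance (schema : String) (out : List (String × String)) : Decidable (Spec_parse_port_schema_py schema out) := by unfold Spec_parse_port_schema_py; infer_instance

-- ===== CLAIM (what is proved, stated in full; the proofs are below) =====
def Claim_equal_parse_port_schema_py : Prop := ∀ (schema : String), Dom_parse_port_schema_py schema → Spec_parse_port_schema_py schema (parse_port_schema_py schema)

-- ===== LEMMAS AND PROOFS =====

-- bracket-depth contribution of one character
def pvDelta (c : Char) : Int :=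
  if c == '(' || c == '[' then 1 else if c == ')' || c == ']' then -1 else 0

def pvNet : List Char → Int
  | [] => 0
  | c :: r => pvDelta c + pvNet r

-- split at the first depth-0 colon (scan starting at depth d), none if there is none
def pvSplitCol : List Char → Int → Option (List Char × List Char)
  | [], _ => none
  | c :: r, d =>
      if c == ':' && d == 0 then some ([], r)
      else (pvSplitCol r (d + pvDelta c)).map (fun p => (c :: p.1, p.2))

theorem pvNet_append (xs ys : List Char) : pvNet (xs ++ ys) = pvNet xs + pvNet ys := by
  induction xs with
  | nil => simp [pvNet]
  | cons c r ih => simp [pvNet, ih]; ring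

theorem pvSplitCol_append (xs ys : List Char) (d : Int) :
    pvSplitCol (xs ++ ys) d =
      match pvSplitCol xs d with
      | some (n, t) => some (n, t ++ ys)
      | none => (pvSplitCol ys (d + pvNet xs)).map (fun p => (xs ++ p.1, p.2)) := by
  induction xs generalizing d with
  | nil => simp [pvSplitCol, pvNet]
  | cons c r ih =>
      simp only [List.cons_append, pvSplitCol, pvNet]
      by_cases h : (c == ':' && d == 0) = true
      · simp [h]
      · have hb : (c == ':' && d == 0) = false := by simpa using h
        simp only [hb, Bool.false_eq_true, if_false]
        rw [ih]
        cases hs : pvSplitCol r (d + pvDelta c) with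
        | none =>
            simp only [hs]
            have heq : d + pvDelta c + pvNet r = d + (pvDelta c + pvNet r) := by ring
            rw [heq]
            cases pvSplitCol ys (d + (pvDelta c + pvNet r)) <;> simp
        | some p => cases p with | mk n t => simp

theorem pa_entry_go_eq (result : PySem.Dict String String) :
    ∀ (rem pre : List Char) (d : Int),
      pa_entry_go (pre ++ rem) result rem pre.length d =
        match pvSplitCol rem d with
        | some (n, t) =>
            let name := PySem.Chars.strip (pre ++ n)
            if name ≠ [] then
              result.insert (String.mk name) (String.mk (PySem.Chars.strip t))
            else result
        | none =>
            if (pre ++ rem) ≠ [] then result.insert (String.mk (pre ++ rem)) "" else result := by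
  intro rem
  induction rem with
  | nil => intro pre d; simp [pa_entry_go, pvSplitCol]
  | cons c rest ih =>
      intro pre d
      have hplen : pre.length + 1 = (pre ++ [c]).length := by simp
      have hmv : ∀ t : List Char, pre ++ c :: t = (pre ++ [c]) ++ t := by
        intro t; simp
      by_cases hop : (c == '(' || c == '[') = true
      · have hcne : (c == ':') = false := by
          rcases Bool.or_eq_true _ _ |>.mp hop with h | h
          · have e : c = '(' := by simpa using h
            subst e; decide
          · have e : c = '[' := by simpa using h
            subst e; decide
        have hc : (c == ':' && d == 0) = false := by simp [hcne]
        have hd1 : pvSplitCol (c :: rest) d =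
            (pvSplitCol rest (d + 1)).map (fun p => (c :: p.1, p.2)) := by
          rw [pvSplitCol, if_neg (by simp [hc])]
          have hd : pvDelta c = 1 := by simp [pvDelta, hop]
          rw [hd]
        rw [pa_entry_go, if_pos hop, hmv rest, hplen, ih, hd1]
        cases hs : pvSplitCol rest (d + 1) with
        | none => simp only [Option.map_none]
        | some p =>
            cases p with | mk n t =>
              simp only [Option.map_some]; rw [hmv n]
      · by_cases hcl : (c == ')' || c == ']') = true
        · have hcne : (c == ':') = false := by
            rcases Bool.or_eq_true _ _ |>.mp hcl with h | h
            · have e : c = ')' := by simpa using h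
              subst e; decide
            · have e : c = ']' := by simpa using h
              subst e; decide
          have hc : (c == ':' && d == 0) = false := by simp [hcne]
          have hd1 : pvSplitCol (c :: rest) d =
              (pvSplitCol rest (d - 1)).map (fun p => (c :: p.1, p.2)) := by
            rw [pvSplitCol, if_neg (by simp [hc])]
            have hd : d + pvDelta c = d - 1 := by
              have : pvDelta c = -1 := by simp [pvDelta, hop, hcl]
              rw [this]; ring
            rw [hd]
          rw [pa_entry_go, if_neg (by simp [hop]), if_pos hcl, hmv rest, hplen, ih, hd1]
          cases hs : pvSplitCol rest (d - 1) with
          | none => simp only [Option.map_none]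
          | some p =>
              cases p with | mk n t =>
                simp only [Option.map_some]; rw [hmv n]
        · by_cases hco : (c == ':' && d == 0) = true
          · rw [pa_entry_go, if_neg (by simp [hop]), if_neg (by simp [hcl]), if_pos hco]
            have ht : (pre ++ c :: rest).take pre.length = pre := by
              simp
            have hdl : (pre ++ c :: rest).drop (pre.length + 1) = rest := by
              rw [hmv rest, hplen, List.drop_left]
            simp [pvSplitCol, hco, ht, hdl]
          · have hcb : (c == ':' && d == 0) = false := by simpa using hco
            have hd1 : pvSplitCol (c :: rest) d =
                (pvSplitCol rest d).map (fun p => (c :: p.1, p.2)) := by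
              rw [pvSplitCol, if_neg (by simp [hcb])]
              have hd : d + pvDelta c = d := by
                have : pvDelta c = 0 := by simp [pvDelta, hop, hcl]
                rw [this]; ring
              rw [hd]
            rw [pa_entry_go, if_neg (by simp [hop]), if_neg (by simp [hcl]),
              if_neg (by simp [hcb]), hmv rest, hplen, ih, hd1]
            cases hs : pvSplitCol rest d with
            | none => simp only [Option.map_none]
            | some p =>
                cases p with | mk n t =>
                  simp only [Option.map_some]; rw [hmv n]

theorem pa_entry_eq (cs : List Char) (result : PySem.Dict String String) :
    pa_entry cs result =
      match pvSplitCol cs 0 with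
      | some (n, t) =>
          let name := PySem.Chars.strip n
          if name ≠ [] then
            result.insert (String.mk name) (String.mk (PySem.Chars.strip t))
          else result
      | none => if cs ≠ [] then result.insert (String.mk cs) "" else result := by
  have := pa_entry_go_eq result cs [] 0
  simpa [pa_entry] using this

-- whitespace characters are neither colons nor brackets
theorem pv_ws_facts (c : Char) (h : PySem.Chars.isspace c = true) :
    pvDelta c = 0 ∧ (c == ':') = false := by
  have h1 : c ≠ '(' := fun e => by subst e; exact absurd h (by decide)
  have h2 : c ≠ '[' := fun e => by subst e; exact absurd h (by decide)
  have h3 : c ≠ ')' := fun e => by subst e; exact absurd h (by decide)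
  have h4 : c ≠ ']' := fun e => by subst e; exact absurd h (by decide)
  have h5 : c ≠ ':' := fun e => by subst e; exact absurd h (by decide)
  simp [pvDelta, h1, h2, h3, h4, h5]

theorem pvNet_lstrip (xs : List Char) : pvNet (PySem.Chars.lstrip xs) = pvNet xs := by
  induction xs with
  | nil => rfl
  | cons c r ih =>
      by_cases h : PySem.Chars.isspace c = true
      · have := (pv_ws_facts c h).1
        simp [PySem.Chars.lstrip, List.dropWhile, h, pvNet, this]
        simpa [PySem.Chars.lstrip] using ih
      · simp [PySem.Chars.lstrip, List.dropWhile, h]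

theorem pvSplitCol_lstrip_none (xs : List Char) (d : Int) (h : pvSplitCol xs d = none) :
    pvSplitCol (PySem.Chars.lstrip xs) d = none := by
  induction xs generalizing d with
  | nil => simpa using h
  | cons c r ih =>
      by_cases hw : PySem.Chars.isspace c = true
      · obtain ⟨hd0, hc⟩ := pv_ws_facts c hw
        simp only [pvSplitCol, hc, Bool.false_and, Bool.false_eq_true, if_false, hd0,
          add_zero, Option.map_eq_none_iff] at h
        have : PySem.Chars.lstrip (c :: r) = PySem.Chars.lstrip r := by
          simp [PySem.Chars.lstrip, List.dropWhile, hw]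
        rw [this]; exact ih d h
      · have : PySem.Chars.lstrip (c :: r) = c :: r := by
          simp [PySem.Chars.lstrip, List.dropWhile, hw]
        rw [this]; exact h

theorem pv_rstrip_prefix (xs : List Char) :
    xs = PySem.Chars.rstrip xs ++ (xs.reverse.takeWhile PySem.Chars.isspace).reverse := by
  simp only [PySem.Chars.rstrip]
  calc xs = xs.reverse.reverse := (List.reverse_reverse xs).symm
    _ = (xs.reverse.takeWhile PySem.Chars.isspace ++
          xs.reverse.dropWhile PySem.Chars.isspace).reverse := by
        rw [List.takeWhile_append_dropWhile]
    _ = (xs.reverse.dropWhile PySem.Chars.isspace).reverse ++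
          (xs.reverse.takeWhile PySem.Chars.isspace).reverse := by
        rw [List.reverse_append]

theorem pvSplitCol_rstrip_none (xs : List Char) (d : Int) (h : pvSplitCol xs d = none) :
    pvSplitCol (PySem.Chars.rstrip xs) d = none := by
  cases hs : pvSplitCol (PySem.Chars.rstrip xs) d with
  | none => rfl
  | some p =>
      exfalso
      have hx := pv_rstrip_prefix xs
      have := pvSplitCol_append (PySem.Chars.rstrip xs)
        (xs.reverse.takeWhile PySem.Chars.isspace).reverse d
      rw [← hx, h, hs] at this
      cases p with | mk n t => simp at this

theorem pv_lstrip_append_cons (xs ys : List Char) (c : Char)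
    (h : PySem.Chars.isspace c = false) :
    PySem.Chars.lstrip (xs ++ c :: ys) = PySem.Chars.lstrip xs ++ c :: ys := by
  simp only [PySem.Chars.lstrip, List.dropWhile_append]
  by_cases he : (List.dropWhile PySem.Chars.isspace xs).isEmpty = true
  · simp [List.dropWhile, h, List.isEmpty_iff.mp he]
  · simp [he]

theorem pv_rstrip_append_cons (xs ys : List Char) (c : Char)
    (h : PySem.Chars.isspace c = false) :
    PySem.Chars.rstrip (xs ++ c :: ys) = xs ++ c :: PySem.Chars.rstrip ys := by
  simp only [PySem.Chars.rstrip, List.reverse_append, List.reverse_cons, List.append_assoc,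
    List.dropWhile_append]
  by_cases he : (List.dropWhile PySem.Chars.isspace ys.reverse).isEmpty = true
  · simp [List.dropWhile, h, List.isEmpty_iff.mp he]
  · simp [he, List.reverse_append]

theorem pv_lstrip_idem (xs : List Char) :
    PySem.Chars.lstrip (PySem.Chars.lstrip xs) = PySem.Chars.lstrip xs := by
  induction xs with
  | nil => rfl
  | cons c r ih =>
      by_cases h : PySem.Chars.isspace c = true
      · simpa [PySem.Chars.lstrip, List.dropWhile, h] using ih
      · simp [PySem.Chars.lstrip, List.dropWhile, h]

theorem pv_rstrip_idem (xs : List Char) :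
    PySem.Chars.rstrip (PySem.Chars.rstrip xs) = PySem.Chars.rstrip xs := by
  simp only [PySem.Chars.rstrip, List.reverse_reverse]
  congr 1
  induction xs.reverse with
  | nil => rfl
  | cons c r ih =>
      by_cases h : PySem.Chars.isspace c = true
      · simpa [List.dropWhile, h] using ih
      · simp [List.dropWhile, h]

theorem pv_strip_lstrip (xs : List Char) :
    PySem.Chars.strip (PySem.Chars.lstrip xs) = PySem.Chars.strip xs := by
  simp [PySem.Chars.strip, pv_lstrip_idem]

theorem pv_dropWhile_head {p : Char → Bool} (l : List Char) (c : Char) (zs : List Char)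
    (h : l.dropWhile p = c :: zs) : p c = false := by
  induction l with
  | nil => simp at h
  | cons a l' ih =>
      by_cases hp : p a = true
      · rw [List.dropWhile_cons_of_pos hp] at h; exact ih h
      · rw [List.dropWhile_cons_of_neg hp] at h
        cases h
        simpa using hp

theorem pv_strip_rstrip (xs : List Char) :
    PySem.Chars.strip (PySem.Chars.rstrip xs) = PySem.Chars.strip xs := by
  cases hl : PySem.Chars.lstrip xs with
  | nil =>
      have hall : ∀ a ∈ xs, PySem.Chars.isspace a = true := by
        simpa [PySem.Chars.lstrip, List.dropWhile_eq_nil_iff] using hl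
      have hr : PySem.Chars.rstrip xs = [] := by
        simp only [PySem.Chars.rstrip, List.reverse_eq_nil_iff, List.dropWhile_eq_nil_iff]
        intro a ha; exact hall a (List.mem_reverse.mp ha)
      rw [hr, PySem.Chars.strip, PySem.Chars.strip, hl]
      rfl
  | cons c zs =>
      have hcw : PySem.Chars.isspace c = false :=
        pv_dropWhile_head xs c zs (by simpa [PySem.Chars.lstrip] using hl)
      have hdw : xs.dropWhile PySem.Chars.isspace = c :: zs := by
        simpa [PySem.Chars.lstrip] using hl
      have hxs : xs = xs.takeWhile PySem.Chars.isspace ++ c :: zs := by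
        conv_lhs => rw [← List.takeWhile_append_dropWhile (p := PySem.Chars.isspace) (l := xs),
          hdw]
      have hwall : ∀ a ∈ xs.takeWhile PySem.Chars.isspace, PySem.Chars.isspace a = true := by
        intro a ha; exact List.mem_takeWhile_imp ha
      have hlw : PySem.Chars.lstrip (xs.takeWhile PySem.Chars.isspace) = [] := by
        simp only [PySem.Chars.lstrip, List.dropWhile_eq_nil_iff]
        exact hwall
      have hrx : PySem.Chars.rstrip xs =
          xs.takeWhile PySem.Chars.isspace ++ c :: PySem.Chars.rstrip zs := by
        conv_lhs => rw [hxs]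
        exact pv_rstrip_append_cons _ _ _ hcw
      rw [hrx]
      simp only [PySem.Chars.strip]
      rw [pv_lstrip_append_cons _ _ _ hcw, hlw, List.nil_append, hl]
      have h3 : PySem.Chars.rstrip (c :: PySem.Chars.rstrip zs) =
          PySem.Chars.rstrip ([] ++ c :: PySem.Chars.rstrip zs) := by simp
      have h4 : PySem.Chars.rstrip (c :: zs) = PySem.Chars.rstrip ([] ++ c :: zs) := by simp
      rw [h3, h4, pv_rstrip_append_cons _ _ _ hcw, pv_rstrip_append_cons _ _ _ hcw,
        pv_rstrip_idem]

theorem pv_strip_cons_colon (n t : List Char) :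
    PySem.Chars.strip (n ++ ':' :: t) =
      PySem.Chars.lstrip n ++ ':' :: PySem.Chars.rstrip t := by
  rw [PySem.Chars.strip, pv_lstrip_append_cons _ _ _ (by decide),
    pv_rstrip_append_cons _ _ _ (by decide)]

theorem pvSplitCol_snoc_none (nameAcc : List Char) (c : Char)
    (hsc : pvSplitCol nameAcc 0 = none)
    (h : (c == ':' && pvNet nameAcc == 0) = false) :
    pvSplitCol (nameAcc ++ [c]) 0 = none := by
  rw [pvSplitCol_append, hsc]
  simp only [zero_add]
  rw [pvSplitCol, if_neg (by simp [h])]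
  simp [pvSplitCol]

-- A's commit (entry-parse of the stripped segment) equals B's commit, under the loop invariant
theorem pv_commit_eq (nameAcc typeAcc : List Char) (seen : Bool)
    (result : PySem.Dict String String)
    (hsc : pvSplitCol nameAcc 0 = none)
    (hseen : seen = true → pvNet nameAcc = 0)
    (htype : seen = false → typeAcc = []) :
    pa_entry (PySem.Chars.strip (if seen then nameAcc ++ ':' :: typeAcc else nameAcc)) result =
      (let name := PySem.Chars.strip nameAcc
       if name ≠ [] then
         result.insert (String.mk name) (String.mk (PySem.Chars.strip typeAcc))
       else result) := by
  cases seen with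
  | false =>
      rw [htype rfl]
      simp only [if_false, Bool.false_eq_true]
      rw [pa_entry_eq]
      have h1 : pvSplitCol (PySem.Chars.strip nameAcc) 0 = none := by
        rw [PySem.Chars.strip]
        exact pvSplitCol_rstrip_none _ _ (pvSplitCol_lstrip_none _ _ hsc)
      simp only [h1]
      by_cases h : PySem.Chars.strip nameAcc = []
      · simp [h]
      · simp [h]
        rfl
  | true =>
      simp only [if_pos]
      rw [pv_strip_cons_colon, pa_entry_eq]
      have h1 : pvSplitCol (PySem.Chars.lstrip nameAcc) 0 = none :=
        pvSplitCol_lstrip_none _ _ hsc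
      have h2 : pvNet (PySem.Chars.lstrip nameAcc) = 0 := by
        rw [pvNet_lstrip]; exact hseen rfl
      have h3 : pvSplitCol (PySem.Chars.lstrip nameAcc ++ ':' :: PySem.Chars.rstrip typeAcc) 0 =
          some (PySem.Chars.lstrip nameAcc, PySem.Chars.rstrip typeAcc) := by
        rw [pvSplitCol_append, h1, h2]
        simp [pvSplitCol]
      simp only [h3, pv_strip_lstrip, pv_strip_rstrip]

-- the guarded end-of-string commit of A equals the unguarded one
theorem pa_commit_guard (cur : List Char) (result : PySem.Dict String String) :
    (if PySem.Chars.strip cur ≠ [] then pa_entry (PySem.Chars.strip cur) result else result) =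
      pa_entry (PySem.Chars.strip cur) result := by
  by_cases h : PySem.Chars.strip cur = []
  · simp [h, pa_entry, pa_entry_go]
  · simp [h]

-- invariant-carrying equivalence of the two main loops
theorem pv_loop_eq :
    ∀ (chars : List Char) (depth : Int) (nameAcc typeAcc : List Char) (seen : Bool)
      (result : PySem.Dict String String),
      pvSplitCol nameAcc 0 = none →
      (seen = true → pvNet nameAcc = 0 ∧ depth = pvNet typeAcc) →
      (seen = false → typeAcc = [] ∧ depth = pvNet nameAcc) →
      pa_go chars depth (if seen then nameAcc ++ ':' :: typeAcc else nameAcc) result =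
        pb_go chars depth nameAcc typeAcc seen result := by
  intro chars
  induction chars with
  | nil =>
      intro depth nameAcc typeAcc seen result hsc hseen hfalse
      simp only [pa_go, pb_go]
      rw [pa_commit_guard]
      exact pv_commit_eq nameAcc typeAcc seen result hsc (fun h => (hseen h).1)
        (fun h => (hfalse h).1)
  | cons c rest ih =>
      intro depth nameAcc typeAcc seen result hsc hseen hfalse
      by_cases hpipe : (c == '|' && depth == 0) = true
      · -- a depth-0 '|': both sides commit the pending entry and reset
        obtain ⟨hcb, hdb⟩ := Bool.and_eq_true _ _ |>.mp hpipe
        have hce : c = '|' := by simpa using hcb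
        have hde : depth = 0 := by simpa using hdb
        subst hce hde
        rw [pa_go, if_neg (by decide), if_neg (by decide), if_pos hpipe]
        rw [pb_go, if_pos hpipe]
        rw [pv_commit_eq nameAcc typeAcc seen result hsc (fun h => (hseen h).1)
          (fun h => (hfalse h).1)]
        simpa using ih 0 [] [] false _ (by simp [pvSplitCol]) (by simp) (by simp [pvNet])
      · by_cases hcol : (c == ':' && depth == 0 && !seen) = true
        · -- the entry's first depth-0 colon
          obtain ⟨hcd, hsb⟩ := Bool.and_eq_true _ _ |>.mp hcol
          obtain ⟨hcb, hdb⟩ := Bool.and_eq_true _ _ |>.mp hcd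
          have hce : c = ':' := by simpa using hcb
          have hde : depth = 0 := by simpa using hdb
          have hse : seen = false := by simpa using hsb
          subst hce hde hse
          obtain ⟨hty, hdn⟩ := hfalse rfl
          subst hty
          rw [pa_go, if_neg (by decide), if_neg (by decide), if_neg hpipe]
          rw [pb_go, if_neg hpipe, if_pos hcol]
          have := ih 0 nameAcc [] true result hsc
            (fun _ => ⟨by omega, by simp [pvNet]⟩) (by simp)
          simpa using this
        · -- plain character: appended to the name or the type accumulator
          have hnc : (c == ':' && depth == 0 && !seen) = false := by simpa using hcol
          rw [pb_go, if_neg hpipe, if_neg hcol]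
          cases seen with
          | true =>
              obtain ⟨hn0, hdt⟩ := hseen rfl
              by_cases hop : (c == '(' || c == '[') = true
              · rw [pa_go, if_pos hop]
                simp only [hop, if_true]
                have := ih (depth + 1) nameAcc (typeAcc ++ [c]) true result hsc
                  (fun _ => ⟨hn0, by
                    rw [pvNet_append]
                    have : pvDelta c = 1 := by simp [pvDelta, hop]
                    simp [pvNet, this]; omega⟩) (by simp)
                simpa [List.append_assoc] using this
              · by_cases hcl : (c == ')' || c == ']') = true
                · rw [pa_go, if_neg hop, if_pos hcl]
                  simp only [hop, hcl, Bool.false_eq_true, if_false, if_true]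
                  have := ih (depth - 1) nameAcc (typeAcc ++ [c]) true result hsc
                    (fun _ => ⟨hn0, by
                      rw [pvNet_append]
                      have : pvDelta c = -1 := by simp [pvDelta, hop, hcl]
                      simp [pvNet, this]; omega⟩) (by simp)
                  simpa [List.append_assoc] using this
                · rw [pa_go, if_neg hop, if_neg hcl, if_neg hpipe]
                  simp only [hop, hcl, Bool.false_eq_true, if_false]
                  have := ih depth nameAcc (typeAcc ++ [c]) true result hsc
                    (fun _ => ⟨hn0, by
                      rw [pvNet_append]
                      have : pvDelta c = 0 := by simp [pvDelta, hop, hcl]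
                      simp [pvNet, this]; omega⟩) (by simp)
                  simpa [List.append_assoc] using this
          | false =>
              obtain ⟨hty, hdn⟩ := hfalse rfl
              subst hty
              by_cases hop : (c == '(' || c == '[') = true
              · have hcne : (c == ':') = false := by
                  rcases Bool.or_eq_true _ _ |>.mp hop with h | h
                  · have e : c = '(' := by simpa using h
                    subst e; decide
                  · have e : c = '[' := by simpa using h
                    subst e; decide
                rw [pa_go, if_pos hop]
                simp only [hop, if_true]
                have := ih (depth + 1) (nameAcc ++ [c]) [] false result
                  (pvSplitCol_snoc_none nameAcc c hsc (by simp [hcne]))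
                  (by simp)
                  (fun _ => ⟨rfl, by
                    rw [pvNet_append]
                    have : pvDelta c = 1 := by simp [pvDelta, hop]
                    simp [pvNet, this]; omega⟩)
                simpa using this
              · by_cases hcl : (c == ')' || c == ']') = true
                · have hcne : (c == ':') = false := by
                    rcases Bool.or_eq_true _ _ |>.mp hcl with h | h
                    · have e : c = ')' := by simpa using h
                      subst e; decide
                    · have e : c = ']' := by simpa using h
                      subst e; decide
                  rw [pa_go, if_neg hop, if_pos hcl]
                  simp only [hop, hcl, Bool.false_eq_true, if_false, if_true]
                  have := ih (depth - 1) (nameAcc ++ [c]) [] false result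
                    (pvSplitCol_snoc_none nameAcc c hsc (by simp [hcne]))
                    (by simp)
                    (fun _ => ⟨rfl, by
                      rw [pvNet_append]
                      have : pvDelta c = -1 := by simp [pvDelta, hop, hcl]
                      simp [pvNet, this]; omega⟩)
                  simpa using this
                · rw [pa_go, if_neg hop, if_neg hcl, if_neg hpipe]
                  simp only [hop, hcl, Bool.false_eq_true, if_false]
                  have hguard : (c == ':' && pvNet nameAcc == 0) = false := by
                    rw [← hdn]
                    simpa using hnc
                  have := ih depth (nameAcc ++ [c]) [] false result
                    (pvSplitCol_snoc_none nameAcc c hsc hguard)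
                    (by simp)
                    (fun _ => ⟨rfl, by
                      rw [pvNet_append]
                      have : pvDelta c = 0 := by simp [pvDelta, hop, hcl]
                      simp [pvNet, this]; omega⟩)
                  simpa using this

-- ===== VERDICT (by name: the statement is the Claim_ definition above) =====
theorem parse_port_schema_py_spec : Claim_equal_parse_port_schema_py := by
  intro schema _
  unfold Spec_parse_port_schema_py parse_port_schema_py parse_port_schema_py_alt
  by_cases h : schema.toList = []
  · simp [h]
  · simp only [h, ne_eq, not_false_eq_true, if_pos]
    congr 1
    have := pv_loop_eq schema.toList 0 [] [] false (PySem.Dict.mk [])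
      (by simp [pvSplitCol]) (by simp) (by simp [pvNet])
    simpa using this
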